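-- pv_equiv track=rewrite | github.com/jpcoding/artifactsNN | src/datasets/data_loader.py | compute_block_coords
-- ===== SOURCE A (Python) =====
-- def compute_block_coords(shape, block_size=64, stride=32):
--     coords = []
--     for x in range(0, shape[0], stride):
--         for y in range(0, shape[1], stride):
--             for z in range(0, shape[2], stride):
--                 x2 =int(min(x + block_size, shape[0]))
--                 y2 = int(min(y + block_size, shape[1]))
--                 z2 = int(min(z + block_size, shape[2]))
--
--                 if x2 - x != block_size or y2 - y != block_size or z2 - z != block_size:
--                     continue  # skip partial blocks at boundary
--
--                 coords.append((x, y, z))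
--     return coords
-- ===== SOURCE B (Python) =====
-- def compute_block_coords(shape, block_size=64, stride=32):
--     # Precompute the valid start coordinates once per axis, then take their
--     # Cartesian product in lexicographic order (no per-block boundary test).
--     # An axis with no valid start means no blocks at all, so stop early.
--     def starts(n):
--         return [c for c in range(0, n, stride) if c + block_size <= n]
--     xs = starts(shape[0])
--     if not xs:
--         return []
--     ys = starts(shape[1])
--     if not ys:
--         return []
--     zs = starts(shape[2])
--     return [(x, y, z) for x in xs for y in ys for z in zs]
-- ===== Notes on version B (the rewrite author's own statement) =====
-- stated objective: simpler
-- what changed: Instead of scanning the full triple nested range and testing every (x,y,z) block against the boundary with three min() computations, B precomputes the list of valid start coordinates once per axis and returns their Cartesian product.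
import Mathlib
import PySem

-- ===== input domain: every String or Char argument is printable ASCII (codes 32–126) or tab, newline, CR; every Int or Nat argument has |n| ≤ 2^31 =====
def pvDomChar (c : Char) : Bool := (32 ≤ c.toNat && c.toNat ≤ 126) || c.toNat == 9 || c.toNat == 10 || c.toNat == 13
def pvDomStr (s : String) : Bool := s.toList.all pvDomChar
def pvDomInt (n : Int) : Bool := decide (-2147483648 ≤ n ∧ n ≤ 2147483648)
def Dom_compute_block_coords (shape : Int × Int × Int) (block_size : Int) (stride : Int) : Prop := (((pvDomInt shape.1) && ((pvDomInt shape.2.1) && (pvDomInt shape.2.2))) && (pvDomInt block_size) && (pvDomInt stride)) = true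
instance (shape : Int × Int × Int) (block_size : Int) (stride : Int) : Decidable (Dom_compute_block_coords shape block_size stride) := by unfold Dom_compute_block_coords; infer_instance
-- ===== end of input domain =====

-- ===== PORT A =====
-- B precomputes valid start coordinates once per axis and takes their Cartesian
-- product, instead of A's full nested-range scan with a per-block boundary test.
def compute_block_coords (shape : Int × Int × Int) (block_size : Int) (stride : Int) : List (Int × Int × Int) :=
  (PySem.List.pyRange 0 shape.1 stride).foldl (fun coords x =>
    (PySem.List.pyRange 0 shape.2.1 stride).foldl (fun coords y =>
      (PySem.List.pyRange 0 shape.2.2 stride).foldl (fun coords z =>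
        let x2 := min (x + block_size) shape.1
        let y2 := min (y + block_size) shape.2.1
        let z2 := min (z + block_size) shape.2.2
        if x2 - x ≠ block_size ∨ y2 - y ≠ block_size ∨ z2 - z ≠ block_size then
          coords
        else
          coords ++ [(x, y, z)]) coords) coords) []

-- ===== PORT B =====
-- Source B's helper 'starts(n)': valid start coordinates along one axis
def pvStarts (n : Int) (block_size : Int) (stride : Int) : List Int :=
  (PySem.List.pyRange 0 n stride).filter (fun c => c + block_size ≤ n)

def compute_block_coords_alt (shape : Int × Int × Int) (block_size : Int) (stride : Int) : List (Int × Int × Int) :=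
  let xs := pvStarts shape.1 block_size stride
  if xs = [] then [] else
  let ys := pvStarts shape.2.1 block_size stride
  if ys = [] then [] else
  let zs := pvStarts shape.2.2 block_size stride
  xs.flatMap (fun x => ys.flatMap (fun y => zs.map (fun z => (x, y, z))))

-- ===== PRECONDITION & SPEC =====
-- Pre_ excludes exactly stride = 0, on which Python's range raises ValueError.
def Pre_compute_block_coords (shape : Int × Int × Int) (block_size : Int) (stride : Int) : Prop := stride ≠ 0
instance (shape : Int × Int × Int) (block_size : Int) (stride : Int) : Decidable (Pre_compute_block_coords shape block_size stride) := by unfold Pre_compute_block_coords; infer_instance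

def pvWitness_compute_block_coords : (Int × Int × Int) × Int × Int := ((5, 4, 3), 2, 1)

def Spec_compute_block_coords (shape : Int × Int × Int) (block_size : Int) (stride : Int) (out : List (Int × Int × Int)) : Prop := out = compute_block_coords_alt shape block_size stride
instance (shape : Int × Int × Int) (block_size : Int) (stride : Int) (out : List (Int × Int × Int)) : Decidable (Spec_compute_block_coords shape block_size stride out) := by unfold Spec_compute_block_coords; infer_instance

-- ===== CLAIM (what is proved, stated in full; the proofs are below) =====
def Claim_equal_compute_block_coords : Prop := ∀ (shape : Int × Int × Int) (block_size : Int) (stride : Int), Dom_compute_block_coords shape block_size stride → Pre_compute_block_coords shape block_size stride → Spec_compute_block_coords shape block_size stride (compute_block_coords shape block_size stride)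

-- ===== LEMMAS AND PROOFS =====

-- 'if cond: continue else append' loop shape
theorem pv_foldl_skip_append {α β : Type} (p : α → Prop) [DecidablePred p] (f : α → β)
    (l : List α) (acc : List β) :
    l.foldl (fun a x => if p x then a else a ++ [f x]) acc
      = acc ++ (l.filter (fun x => decide ¬ p x)).map f := by
  induction l generalizing acc with
  | nil => simp
  | cons h t ih => by_cases hp : p h <;> simp [hp, ih]

theorem pv_filter_const_and {α : Type} (c : Bool) (p : α → Bool) (l : List α) :
    l.filter (fun x => c && p x) = if c then l.filter p else [] := by
  cases c <;> simp

theorem pv_flatMap_if {α β : Type} (p : α → Bool) (g : α → List β) (l : List α) :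
    l.flatMap (fun x => if p x then g x else []) = (l.filter p).flatMap g := by
  induction l with
  | nil => simp
  | cons h t ih => cases hp : p h <;> simp [hp, ih]

theorem pv_alt_eq_flatMap (shape : Int × Int × Int) (block_size stride : Int) :
    compute_block_coords_alt shape block_size stride
      = (pvStarts shape.1 block_size stride).flatMap (fun x =>
          (pvStarts shape.2.1 block_size stride).flatMap (fun y =>
            (pvStarts shape.2.2 block_size stride).map (fun z => (x, y, z)))) := by
  unfold compute_block_coords_alt
  by_cases h1 : pvStarts shape.1 block_size stride = [] <;>
    by_cases h2 : pvStarts shape.2.1 block_size stride = [] <;>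
      simp [h1, h2]

theorem compute_block_coords_eq (shape : Int × Int × Int) (block_size stride : Int) :
    compute_block_coords shape block_size stride = compute_block_coords_alt shape block_size stride := by
  obtain ⟨s1, s2, s3⟩ := shape
  rw [pv_alt_eq_flatMap]
  simp only [compute_block_coords, pvStarts,
    pv_foldl_skip_append, PySem.List.foldl_append_eq_flatMap, List.nil_append]
  have hcond : ∀ x y z : Int,
      (decide ¬ (min (x + block_size) s1 - x ≠ block_size ∨
        min (y + block_size) s2 - y ≠ block_size ∨ min (z + block_size) s3 - z ≠ block_size))
      = ((decide (x + block_size ≤ s1) && decide (y + block_size ≤ s2)) &&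
          decide (z + block_size ≤ s3)) := by
    intro x y z
    simp only [← Bool.decide_and, decide_eq_decide]
    omega
  calc (PySem.List.pyRange 0 s1 stride).flatMap (fun x =>
          (PySem.List.pyRange 0 s2 stride).flatMap (fun y =>
            ((PySem.List.pyRange 0 s3 stride).filter (fun z =>
              decide ¬ (min (x + block_size) s1 - x ≠ block_size ∨
                min (y + block_size) s2 - y ≠ block_size ∨
                min (z + block_size) s3 - z ≠ block_size))).map (fun z => (x, y, z))))
      = (PySem.List.pyRange 0 s1 stride).flatMap (fun x =>
          (PySem.List.pyRange 0 s2 stride).flatMap (fun y =>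
            if decide (x + block_size ≤ s1) && decide (y + block_size ≤ s2) then
              ((PySem.List.pyRange 0 s3 stride).filter (fun z => decide (z + block_size ≤ s3))).map (fun z => (x, y, z))
            else [])) := by
        refine List.flatMap_congr ?_
        intro x _
        refine List.flatMap_congr ?_
        intro y _
        rw [List.filter_congr (fun z _ => hcond x y z),
          pv_filter_const_and (decide (x + block_size ≤ s1) && decide (y + block_size ≤ s2))
            (fun z => decide (z + block_size ≤ s3))]
        split <;> simp
    _ = (PySem.List.pyRange 0 s1 stride).flatMap (fun x =>
          if decide (x + block_size ≤ s1) then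
            ((PySem.List.pyRange 0 s2 stride).filter (fun y => decide (y + block_size ≤ s2))).flatMap (fun y =>
              ((PySem.List.pyRange 0 s3 stride).filter (fun z => decide (z + block_size ≤ s3))).map (fun z => (x, y, z)))
          else []) := by
        refine List.flatMap_congr ?_
        intro x _
        rw [pv_flatMap_if (fun y => decide (x + block_size ≤ s1) && decide (y + block_size ≤ s2)),
          pv_filter_const_and (decide (x + block_size ≤ s1))
            (fun y => decide (y + block_size ≤ s2))]
        split <;> simp
    _ = _ := pv_flatMap_if (fun x => decide (x + block_size ≤ s1)) _ _

-- ===== VERDICT (by name: the statement is the Claim_ definition above) =====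
theorem compute_block_coords_spec : Claim_equal_compute_block_coords := by
  intro shape block_size stride _ _
  exact compute_block_coords_eq shape block_size stride
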